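-- pv_equiv track=rewrite | github.com/sundar91/dsa | Arrays/2DArray/matrix-queries.py | solve
-- ===== SOURCE A (Python) =====
-- def solve(A, B):
--     a = [[0]*A for  i in range(A)]
--     m = len(B)
--     res = []
--     sum = 0
--     for i in range(m):
--         if B[i][0] == 1:
--             res.append(sum)
--         elif B[i][0] == 2:
--              r = B[i][1] - 1
--              c = B[i][2] - 1
--              if 1 - a[r][c] == 0 and sum > 0:
--                 sum -= 1
--              else:
--                  sum += 1
--              a[r][c] = 1 - a[r][c]
--         elif B[i][0] == 3:
--              r= B[i][1] - 1
--              for j in range(A):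
--                  a[r][j] =  1 - a[r][j]
--                  if a[r][j] == 0 and sum > 0:
--                      sum -= 1
--                  else:
--                      sum += 1
--     return res
-- ===== SOURCE B (Python) =====
-- def solve(A, B):
--     raw = [[0] * A for _ in range(A)]   # raw cell states (before row flips)
--     flip = [0] * A                      # row flip parity
--     cnt = [0] * A                       # ones in raw row
--     total = 0                           # ones in the whole (virtual) matrix
--     res = []
--     for q in B:
--         t = q[0]
--         if t == 1:
--             res.append(total)
--         elif t == 2:
--             r = q[1] - 1
--             c = q[2] - 1
--             v = raw[r][c]
--             old = v if flip[r] == 0 else 1 - v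
--             raw[r][c] = 1 - v
--             cnt[r] += 1 - 2 * v
--             total += 1 - 2 * old
--         elif t == 3:
--             r = q[1] - 1
--             ones = cnt[r] if flip[r] == 0 else A - cnt[r]
--             flip[r] = 1 - flip[r]
--             total += A - 2 * ones
--     return res
-- ===== Notes on version B (the rewrite author's own statement) =====
-- stated objective: alternative
-- what changed: B replaces A's dense-matrix walk over a whole row on each row-flip query (and its per-cell sum guard) by per-row ones-counts plus a lazy row-flip parity, updating the global count arithmetically per query.
-- outside the precondition, e.g. on solve(0, [[3, 1], [1]]): A returns [0], B raises IndexError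
import Mathlib
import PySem

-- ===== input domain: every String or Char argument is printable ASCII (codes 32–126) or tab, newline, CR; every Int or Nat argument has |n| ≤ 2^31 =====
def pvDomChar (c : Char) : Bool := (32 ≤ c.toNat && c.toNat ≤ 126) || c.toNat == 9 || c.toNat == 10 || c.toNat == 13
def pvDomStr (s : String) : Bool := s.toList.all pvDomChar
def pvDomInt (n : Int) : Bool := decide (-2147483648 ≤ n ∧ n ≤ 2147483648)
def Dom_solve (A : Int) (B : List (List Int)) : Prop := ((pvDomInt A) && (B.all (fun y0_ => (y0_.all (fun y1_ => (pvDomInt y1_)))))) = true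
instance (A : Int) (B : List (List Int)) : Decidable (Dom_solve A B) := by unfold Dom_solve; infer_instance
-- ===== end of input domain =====

-- B replaces A's per-row-flip matrix walk by per-row ones-counts plus a lazy row-flip
-- parity, a different bookkeeping of the same counts (objective: alternative).


-- ===== PORT A =====
-- inner loop of the B[i][0] == 3 branch: "for j in range(A): …"
def innerStepA (r : Int) (pr : List (List Int) × Int) (j : Int) : List (List Int) × Int :=
  let a := pr.1
  let sum := pr.2
  let row := PySem.List.pyGetD a r []
  let a' := PySem.List.pySetD a r (PySem.List.pySetD row j (1 - PySem.List.pyGetD row j 0))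
  if PySem.List.pyGetD (PySem.List.pyGetD a' r []) j 0 = 0 ∧ sum > 0 then (a', sum - 1)
  else (a', sum + 1)

-- one iteration of A's "for i in range(m)" loop; state = (a, res, sum)
def stepA (A : Int) (st : List (List Int) × List Int × Int) (q : List Int) :
    List (List Int) × List Int × Int :=
  let a := st.1
  let res := st.2.1
  let sum := st.2.2
  if PySem.List.pyGetD q 0 0 = 1 then (a, res ++ [sum], sum)
  else if PySem.List.pyGetD q 0 0 = 2 then
    let r := PySem.List.pyGetD q 1 0 - 1
    let c := PySem.List.pyGetD q 2 0 - 1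
    let row := PySem.List.pyGetD a r []
    let v := PySem.List.pyGetD row c 0
    let sum' := if 1 - v = 0 ∧ sum > 0 then sum - 1 else sum + 1
    (PySem.List.pySetD a r (PySem.List.pySetD row c (1 - v)), res, sum')
  else if PySem.List.pyGetD q 0 0 = 3 then
    let r := PySem.List.pyGetD q 1 0 - 1
    let p := (PySem.List.pyRange 0 A 1).foldl (innerStepA r) (a, sum)
    (p.1, res, p.2)
  else st

def solve (A : Int) (B : List (List Int)) : List Int :=
  let a0 := (PySem.List.pyRange 0 A 1).map (fun _ => List.replicate A.toNat (0 : Int))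
  let fin := (PySem.List.pyRange 0 (PySem.List.len B) 1).foldl
    (fun st i => stepA A st (PySem.List.pyGetD B i [])) (a0, ([] : List Int), (0 : Int))
  fin.2.1

-- ===== PORT B =====
-- one iteration of B's "for q in B" loop; state = (raw, flip, cnt, total, res)
def stepB (A : Int) (st : List (List Int) × List Int × List Int × Int × List Int) (q : List Int) :
    List (List Int) × List Int × List Int × Int × List Int :=
  let raw := st.1
  let flip := st.2.1
  let cnt := st.2.2.1
  let total := st.2.2.2.1
  let res := st.2.2.2.2
  let t := PySem.List.pyGetD q 0 0
  if t = 1 then (raw, flip, cnt, total, res ++ [total])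
  else if t = 2 then
    let r := PySem.List.pyGetD q 1 0 - 1
    let c := PySem.List.pyGetD q 2 0 - 1
    let v := PySem.List.pyGetD (PySem.List.pyGetD raw r []) c 0
    let old := if PySem.List.pyGetD flip r 0 = 0 then v else 1 - v
    (PySem.List.pySetD raw r (PySem.List.pySetD (PySem.List.pyGetD raw r []) c (1 - v)), flip,
     PySem.List.pySetD cnt r (PySem.List.pyGetD cnt r 0 + (1 - 2 * v)),
     total + (1 - 2 * old), res)
  else if t = 3 then
    let r := PySem.List.pyGetD q 1 0 - 1
    let ones := if PySem.List.pyGetD flip r 0 = 0 then PySem.List.pyGetD cnt r 0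
                else A - PySem.List.pyGetD cnt r 0
    (raw, PySem.List.pySetD flip r (1 - PySem.List.pyGetD flip r 0), cnt,
     total + (A - 2 * ones), res)
  else st

def solve_alt (A : Int) (B : List (List Int)) : List Int :=
  let fin := B.foldl (stepB A)
    ((PySem.List.pyRange 0 A 1).map (fun _ => List.replicate A.toNat (0 : Int)),
     List.replicate A.toNat (0 : Int), List.replicate A.toNat (0 : Int),
     (0 : Int), ([] : List Int))
  fin.2.2.2.2

-- ===== PRECONDITION & SPEC =====
-- Pre_ admits exactly the queries on which Python A returns without an IndexError — every
-- query nonempty, cell/row queries long enough with their 1-based (possibly negative,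
-- Python-wrapped) indices in range — EXCEPT row-flip queries when A ≤ 0: there A's inner
-- loop "for j in range(A)" is empty so the out-of-range row index is silently never checked
-- (a no-op artefact of A's loop) while B raises IndexError on it.
def Pre_solve (A : Int) (B : List (List Int)) : Prop :=
  ∀ q ∈ B, q ≠ [] ∧
    (q.getD 0 0 = 2 → 3 ≤ q.length ∧ 1 - A ≤ q.getD 1 0 ∧ q.getD 1 0 ≤ A ∧
        1 - A ≤ q.getD 2 0 ∧ q.getD 2 0 ≤ A) ∧
    (q.getD 0 0 = 3 → 2 ≤ q.length ∧ 1 - A ≤ q.getD 1 0 ∧ q.getD 1 0 ≤ A)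
instance (A : Int) (B : List (List Int)) : Decidable (Pre_solve A B) := by
  unfold Pre_solve; infer_instance

def pvWitness_solve : Int × List (List Int) := (2, [[2, 1, 2], [1], [3, 2], [2, 0, -1], [1]])

def Spec_solve (A : Int) (B : List (List Int)) (out : List Int) : Prop := out = solve_alt A B
instance (A : Int) (B : List (List Int)) (out : List Int) : Decidable (Spec_solve A B out) := by
  unfold Spec_solve; infer_instance

-- ===== CLAIM (what is proved, stated in full; the proofs are below) =====
def Claim_equal_solve : Prop :=
  ∀ (A : Int) (B : List (List Int)), Dom_solve A B → Pre_solve A B → Spec_solve A B (solve A B)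

-- ===== LEMMAS AND PROOFS =====

-- normalised (wrapped) Python index
def nidx (n : Nat) (i : Int) : Nat := if 0 ≤ i then i.toNat else n - (-i).toNat

-- a row as the caller sees it: raw row, flipped if the row parity is 1
def flipRow (f : Int) (row : List Int) : List Int :=
  if f = 0 then row else row.map (fun x => 1 - x)

-- the virtual matrix B maintains lazily
def absMat (flip : List Int) (raw : List (List Int)) : List (List Int) :=
  List.zipWith flipRow flip raw

-- total number of ones of a 0/1 matrix
def tot (a : List (List Int)) : Int := (a.map List.sum).sum

def rows01 (n : Nat) (a : List (List Int)) : Prop :=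
  ∀ row ∈ a, row.length = n ∧ ∀ x ∈ row, x = 0 ∨ x = 1

-- the coupling invariant between A's state (a, res, sum) and B's state (raw, flip, cnt, total, res)
def InvAB (A : Int) (sa : List (List Int) × List Int × Int)
    (sb : List (List Int) × List Int × List Int × Int × List Int) : Prop :=
  sb.1.length = A.toNat ∧ sb.2.1.length = A.toNat ∧ sb.2.2.1.length = A.toNat ∧
  rows01 A.toNat sb.1 ∧
  (∀ f ∈ sb.2.1, f = 0 ∨ f = 1) ∧
  sb.2.2.1 = sb.1.map List.sum ∧
  sa.1 = absMat sb.2.1 sb.1 ∧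
  sa.2.1 = sb.2.2.2.2 ∧
  sa.2.2 = sb.2.2.2.1 ∧
  sb.2.2.2.1 = tot (absMat sb.2.1 sb.1)

lemma nidx_lt (n : Nat) (i : Int) (h : PySem.Raise.InRange n i) : nidx n i < n := by
  obtain ⟨h1, h2⟩ := h
  unfold nidx
  split_ifs
  · omega
  · omega

lemma pyIdx?_eq_nidx (n : Nat) (i : Int) (h : PySem.Raise.InRange n i) :
    PySem.List.pyIdx? n i = some (nidx n i) := by
  obtain ⟨h1, h2⟩ := h
  simp only [PySem.List.pyIdx?, nidx]
  split_ifs <;> simp_all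

lemma pyGetD_nidx {α : Type} (xs : List α) (i : Int) (d : α)
    (h : PySem.Raise.InRange xs.length i) :
    PySem.List.pyGetD xs i d = xs.getD (nidx xs.length i) d := by
  simp [PySem.List.pyGetD, PySem.List.pyGet?, pyIdx?_eq_nidx _ _ h, List.getD_eq_getElem?_getD]

lemma pySetD_nidx {α : Type} (xs : List α) (i : Int) (v : α)
    (h : PySem.Raise.InRange xs.length i) :
    PySem.List.pySetD xs i v = xs.set (nidx xs.length i) v := by
  simp [PySem.List.pySetD, PySem.List.pySet?, pyIdx?_eq_nidx _ _ h]

lemma pyGetD_toNat {α : Type} (xs : List α) (i : Int) (d : α) (h : 0 ≤ i) :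
    PySem.List.pyGetD xs i d = xs.getD i.toNat d := by
  simp [PySem.List.pyGetD, PySem.List.pyGet?_of_nonneg xs h, List.getD_eq_getElem?_getD]

lemma getD_set_self {α : Type} (l : List α) (k : Nat) (x d : α) (h : k < l.length) :
    (l.set k x).getD k d = x := by
  simp [List.getD_eq_getElem?_getD, h]

lemma getD_mem {α : Type} (l : List α) (k : Nat) (d : α) (h : k < l.length) :
    l.getD k d ∈ l := by
  simp [List.getD_eq_getElem?_getD, List.getElem?_eq_getElem h, List.getElem_mem]

lemma sum_set_getD (l : List Int) (k : Nat) (x : Int) (h : k < l.length) :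
    (l.set k x).sum = l.sum + x - l.getD k 0 := by
  induction l generalizing k with
  | nil => simp at h
  | cons a t ih =>
    cases k with
    | zero => simp [List.getD]; ring
    | succ m =>
      simp only [List.set, List.sum_cons, List.getD_cons_succ]
      rw [ih m (by simpa using h)]; ring

lemma sum_map_one_sub (row : List Int) :
    ((row.map (fun x => 1 - x)).sum) = row.length - row.sum := by
  induction row with
  | nil => simp
  | cons a t ih => simp [ih]; ring

lemma map_one_sub_involutive (row : List Int) :
    ((row.map (fun x => 1 - x)).map (fun x => 1 - x)) = row := by
  rw [List.map_map]
  have : ((fun x : Int => 1 - x) ∘ fun x : Int => 1 - x) = id := by funext x; simp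
  rw [this, List.map_id]

lemma length_flipRow (f : Int) (row : List Int) : (flipRow f row).length = row.length := by
  unfold flipRow; split_ifs <;> simp

lemma length_absMat (flip : List Int) (raw : List (List Int)) (h : flip.length = raw.length) :
    (absMat flip raw).length = raw.length := by
  simp [absMat, h]

lemma getD_absMat (flip : List Int) (raw : List (List Int)) (k : Nat)
    (h : flip.length = raw.length) (hk : k < raw.length) :
    (absMat flip raw).getD k [] = flipRow (flip.getD k 0) (raw.getD k []) := by
  induction raw generalizing flip k with
  | nil => simp at hk
  | cons rr tr ih =>
    cases flip with
    | nil => simp at h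
    | cons f tf =>
      cases k with
      | zero => simp [absMat, List.getD]
      | succ m =>
        simp only [absMat, List.zipWith_cons_cons, List.getD_cons_succ]
        exact ih tf m (by simpa using h) (by simpa using hk)

lemma absMat_set_raw (flip : List Int) (raw : List (List Int)) (k : Nat) (x : List Int)
    (h : flip.length = raw.length) (hk : k < raw.length) :
    absMat flip (raw.set k x) = (absMat flip raw).set k (flipRow (flip.getD k 0) x) := by
  induction raw generalizing flip k with
  | nil => simp at hk
  | cons rr tr ih =>
    cases flip with
    | nil => simp at h
    | cons f tf =>
      cases k with
      | zero => simp [absMat, List.getD]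
      | succ m =>
        simp only [absMat, List.set, List.zipWith_cons_cons, List.getD_cons_succ] at *
        rw [ih tf m (by simpa using h) (by simpa using hk)]

lemma absMat_set_flip (flip : List Int) (raw : List (List Int)) (k : Nat) (f' : Int)
    (h : flip.length = raw.length) (hk : k < raw.length) :
    absMat (flip.set k f') raw = (absMat flip raw).set k (flipRow f' (raw.getD k [])) := by
  induction raw generalizing flip k with
  | nil => simp at hk
  | cons rr tr ih =>
    cases flip with
    | nil => simp at h
    | cons f tf =>
      cases k with
      | zero => simp [absMat, List.getD]
      | succ m =>
        simp only [absMat, List.set, List.zipWith_cons_cons, List.getD_cons_succ] at *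
        rw [ih tf m (by simpa using h) (by simpa using hk)]

lemma flipRow_one_sub (f : Int) (row : List Int) (hf : f = 0 ∨ f = 1) :
    flipRow (1 - f) row = (flipRow f row).map (fun x => 1 - x) := by
  rcases hf with rfl | rfl
  · simp [flipRow]
  · simp only [flipRow, if_neg one_ne_zero]
    exact (map_one_sub_involutive row).symm

lemma flipRow_set (f : Int) (row : List Int) (l : Nat) (x : Int) (hf : f = 0 ∨ f = 1) :
    flipRow f (row.set l x) = (flipRow f row).set l (if f = 0 then x else 1 - x) := by
  rcases hf with rfl | rfl <;> simp [flipRow, List.map_set]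

lemma tot_set (a : List (List Int)) (k : Nat) (x : List Int) (hk : k < a.length) :
    tot (a.set k x) = tot a + x.sum - (a.getD k []).sum := by
  unfold tot
  rw [List.map_set, sum_set_getD _ _ _ (by simpa using hk)]
  congr 1
  induction a generalizing k with
  | nil => simp at hk
  | cons h t ih =>
    cases k with
    | zero => simp [List.getD]
    | succ m => simpa using ih m (by simpa using hk)

lemma tot_one_le (a : List (List Int)) (k l : Nat) (hk : k < a.length)
    (hl : l < (a.getD k []).length)
    (h01 : ∀ row ∈ a, ∀ x ∈ row, x = 0 ∨ x = 1)
    (h1 : (a.getD k []).getD l 0 = 1) : 1 ≤ tot a := by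
  have hrow : a.getD k [] ∈ a := getD_mem _ _ _ hk
  have hmem : (a.getD k []).getD l 0 ∈ a.getD k [] := getD_mem _ _ _ hl
  have hrs : (1 : Int) ≤ (a.getD k []).sum := by
    rw [← h1]
    exact List.single_le_sum
      (fun y hy => by rcases h01 _ hrow y hy with rfl | rfl <;> omega) _ hmem
  have hms : (a.getD k []).sum ∈ a.map List.sum := List.mem_map_of_mem hrow
  have : (a.getD k []).sum ≤ (a.map List.sum).sum := by
    refine List.single_le_sum (fun y hy => ?_) _ hms
    obtain ⟨row, hrow', rfl⟩ := List.mem_map.mp hy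
    exact List.sum_nonneg (fun x hx => by rcases h01 _ hrow' x hx with rfl | rfl <;> omega)
  unfold tot; omega

lemma getD_map' {α β : Type} (f : α → β) (l : List α) (k : Nat) (d : β) (d' : α)
    (h : k < l.length) : (l.map f).getD k d = f (l.getD k d') := by
  simp [List.getD_eq_getElem?_getD, List.getElem?_map, List.getElem?_eq_getElem h]

lemma getD_flipRow (f : Int) (row : List Int) (l : Nat) (hl : l < row.length) :
    (flipRow f row).getD l 0 = if f = 0 then row.getD l 0 else 1 - row.getD l 0 := by
  unfold flipRow
  split_ifs with hf
  · rfl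
  · exact getD_map' _ _ _ _ 0 hl

lemma inRange_of_bounds (A x : Int) (h1 : 1 - A ≤ x) (h2 : x ≤ A) :
    PySem.Raise.InRange A.toNat (x - 1) := by
  unfold PySem.Raise.InRange; omega

lemma pos_of_bounds (A x : Int) (h1 : 1 - A ≤ x) (h2 : x ≤ A) : 0 < A := by omega

lemma rows01_absMat (n : Nat) (flip : List Int) (raw : List (List Int))
    (hf : ∀ f ∈ flip, f = 0 ∨ f = 1) (hraw : rows01 n raw) :
    rows01 n (absMat flip raw) := by
  induction raw generalizing flip with
  | nil => intro row hrow; simp [absMat] at hrow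
  | cons rr tr ih =>
    cases flip with
    | nil => intro row hrow; simp [absMat] at hrow
    | cons f tf =>
      intro row hrow
      simp only [absMat, List.zipWith_cons_cons, List.mem_cons] at hrow
      rcases hrow with rfl | hrow
      · obtain ⟨hlen, h01⟩ := hraw rr List.mem_cons_self
        refine ⟨by rw [length_flipRow]; exact hlen, ?_⟩
        intro x hx
        unfold flipRow at hx
        split_ifs at hx
        · exact h01 x hx
        · obtain ⟨y, hy, rfl⟩ := List.mem_map.mp hx
          rcases h01 y hy with rfl | rfl <;> simp
      · exact ih tf (fun g hg => hf g (List.mem_cons_of_mem _ hg))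
          (fun rr' hrr' => hraw rr' (List.mem_cons_of_mem _ hrr')) row hrow

lemma rows01_set (n : Nat) (raw : List (List Int)) (k : Nat) (row' : List Int)
    (hraw : rows01 n raw) (hlen : row'.length = n) (h01 : ∀ x ∈ row', x = 0 ∨ x = 1) :
    rows01 n (raw.set k row') := by
  intro row hrow
  rcases List.mem_or_eq_of_mem_set hrow with hmem | rfl
  · exact hraw row hmem
  · exact ⟨hlen, h01⟩

-- A's inner row-flip loop, characterised: it flips the suffix of row k from position j on,
-- and keeps sum equal to the total number of ones.
lemma inner_loop (A : Int) (r : Int) (hr : PySem.Raise.InRange A.toNat r) :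
    ∀ (d : Nat) (j : Int) (a : List (List Int)) (s : Int),
    j + d = A → 0 ≤ j → a.length = A.toNat → rows01 A.toNat a → s = tot a →
    (PySem.List.pyRange j A 1).foldl (innerStepA r) (a, s) =
      ((a.set (nidx A.toNat r)
        ((a.getD (nidx A.toNat r) []).take j.toNat ++
         ((a.getD (nidx A.toNat r) []).drop j.toNat).map (fun x => 1 - x))),
       tot (a.set (nidx A.toNat r)
        ((a.getD (nidx A.toNat r) []).take j.toNat ++
         ((a.getD (nidx A.toNat r) []).drop j.toNat).map (fun x => 1 - x)))) := by
  intro d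
  induction d with
  | zero =>
    intro j a s hjd hj hla hrows hs
    rw [PySem.List.pyRange_one_eq_nil (by omega)]
    simp only [List.foldl_nil]
    set k := nidx A.toNat r with hk
    have hkn : k < A.toNat := nidx_lt _ _ hr
    obtain ⟨hlen, _⟩ := hrows _ (getD_mem a k [] (by rw [hla]; exact hkn))
    have hjn : j.toNat = A.toNat := by omega
    rw [hjn, List.take_of_length_le (by rw [hlen]),
      List.drop_eq_nil_of_le (by rw [hlen])]
    simp only [List.map_nil, List.append_nil]
    have hset : a.set k (a.getD k []) = a := by
      rw [List.getD_eq_getElem a [] (by rw [hla]; exact hkn)]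
      exact List.set_getElem_self (by rw [hla]; exact hkn)
    rw [hset, hs]
  | succ d ih =>
    intro j a s hjd hj hla hrows hs
    rw [PySem.List.pyRange_one_cons (by omega), List.foldl_cons]
    set k := nidx A.toNat r with hk
    have hkn : k < A.toNat := nidx_lt _ _ hr
    set row := a.getD k [] with hrowdef
    obtain ⟨hlen, h01⟩ := hrows row (getD_mem _ _ _ (by rw [hla]; exact hkn))
    set jn := j.toNat with hjn
    have hjnl : jn < A.toNat := by omega
    set v := row.getD jn 0 with hv
    have hv01 : v = 0 ∨ v = 1 := h01 _ (getD_mem row jn 0 (by rw [hlen]; exact hjnl))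
    have htota' : tot (a.set k (row.set jn (1 - v))) = tot a + 1 - 2 * v := by
      rw [tot_set _ _ _ (by rw [hla]; exact hkn), sum_set_getD _ _ _ (by rw [hlen]; exact hjnl),
        ← hrowdef, ← hv]
      ring
    have hstep : innerStepA r (a, s) j =
        (a.set k (row.set jn (1 - v)), tot (a.set k (row.set jn (1 - v)))) := by
      unfold innerStepA
      dsimp only
      have f1 : PySem.List.pyGetD a r [] = row := by
        rw [pyGetD_nidx _ _ _ (hla.symm ▸ hr), hla]
      have f2 : PySem.List.pyGetD row j 0 = v := by
        rw [pyGetD_toNat _ _ _ hj]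
      have f3 : ∀ x : Int, PySem.List.pySetD row j x = row.set jn x := by
        intro x; rw [PySem.List.pySetD_of_nonneg _ _ hj]
      have f4 : ∀ x, PySem.List.pySetD a r x = a.set k x := by
        intro x; rw [pySetD_nidx _ _ _ (hla.symm ▸ hr), hla]
      rw [f1, f2, f3, f4]
      have f5 : PySem.List.pyGetD (a.set k (row.set jn (1 - v))) r [] = row.set jn (1 - v) := by
        rw [pyGetD_nidx _ _ _ (by rw [List.length_set, hla]; exact hr), List.length_set, hla,
          ← hk, getD_set_self _ _ _ _ (by rw [hla]; exact hkn)]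
      have f6 : PySem.List.pyGetD (row.set jn (1 - v)) j 0 = 1 - v := by
        rw [pyGetD_toNat _ _ _ hj, ← hjn, getD_set_self _ _ _ _ (by rw [hlen]; exact hjnl)]
      rw [f5, f6]
      rcases hv01 with h0 | h0
      · rw [if_neg (by simp [h0])]
        simp only [Prod.mk.injEq, true_and]
        omega
      · have h1le : 1 ≤ tot a := by
          refine tot_one_le a k jn (by rw [hla]; exact hkn)
            (by rw [← hrowdef, hlen]; exact hjnl) (fun r' hr' => (hrows r' hr').2) ?_
          rw [← hrowdef, ← hv, h0]
        rw [if_pos ⟨by omega, by omega⟩]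
        simp only [Prod.mk.injEq, true_and]
        omega
    rw [hstep]
    have hset_len : (a.set k (row.set jn (1 - v))).length = A.toNat := by simp [hla]
    have hrows' : rows01 A.toNat (a.set k (row.set jn (1 - v))) := by
      refine rows01_set _ _ _ _ hrows (by simp [hlen]) ?_
      intro x hx
      rcases List.mem_or_eq_of_mem_set hx with h' | rfl
      · exact h01 x h'
      · omega
    rw [ih (j + 1) (a.set k (row.set jn (1 - v))) _ (by omega) (by omega) hset_len hrows' rfl]
    rw [getD_set_self _ _ _ _ (by rw [hla]; exact hkn)]
    have hj1 : (j + 1).toNat = jn + 1 := by omega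
    rw [hj1]
    have hgv : row[jn]'(by rw [hlen]; exact hjnl) = v := by
      rw [hv, List.getD_eq_getElem row 0 (by rw [hlen]; exact hjnl)]
    have hds : row.drop jn = v :: row.drop (jn + 1) := by
      rw [List.drop_eq_getElem_cons (by rw [hlen]; exact hjnl), hgv]
    have hmat : (a.set k (row.set jn (1 - v))).set k
        ((row.set jn (1 - v)).take (jn + 1) ++
         ((row.set jn (1 - v)).drop (jn + 1)).map (fun x => 1 - x)) =
        a.set k (row.take jn ++ (row.drop jn).map (fun x => 1 - x)) := by
      rw [List.set_set]
      congr 1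
      rw [hds, List.map_cons]
      rw [List.set_eq_take_cons_drop _ (by rw [hlen]; exact hjnl)]
      rw [List.take_append, List.drop_append]
      have hlt : (row.take jn).length = jn := by rw [List.length_take]; omega
      rw [hlt]
      have ht1 : jn + 1 - jn = 1 := by omega
      rw [ht1, List.take_of_length_le (l := row.take jn) (by omega),
        List.drop_eq_nil_of_le (as := row.take jn) (by omega)]
      simp
    rw [hmat]

-- per-query condition, as in Pre_solve
def Qok (A : Int) (q : List Int) : Prop :=
  q ≠ [] ∧
  (q.getD 0 0 = 2 → 3 ≤ q.length ∧ 1 - A ≤ q.getD 1 0 ∧ q.getD 1 0 ≤ A ∧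
      1 - A ≤ q.getD 2 0 ∧ q.getD 2 0 ≤ A) ∧
  (q.getD 0 0 = 3 → 2 ≤ q.length ∧ 1 - A ≤ q.getD 1 0 ∧ q.getD 1 0 ≤ A)

lemma step_rel (A : Int) (q : List Int) (sa : List (List Int) × List Int × Int)
    (sb : List (List Int) × List Int × List Int × Int × List Int)
    (hq : Qok A q) (h : InvAB A sa sb) : InvAB A (stepA A sa q) (stepB A sb q) := by
  obtain ⟨a, res, sum⟩ := sa
  obtain ⟨raw, flip, cnt, total, res2⟩ := sb
  obtain ⟨hlr, hlf, hlc, hrows, hf01, hcnt, habs, hres, hsum, htot⟩ := h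
  obtain ⟨hne, hq2, hq3⟩ := hq
  simp only at hlr hlf hlc hrows hf01 hcnt habs hres hsum htot
  have ht0 : PySem.List.pyGetD q 0 0 = q.getD 0 0 := by
    rw [pyGetD_toNat q 0 0 le_rfl]; rfl
  have hflen : flip.length = raw.length := by rw [hlf, hlr]
  have hla : a.length = A.toNat := by
    rw [habs, length_absMat _ _ hflen, hlr]
  unfold stepA stepB
  dsimp only
  rw [ht0]
  by_cases h1 : q.getD 0 0 = 1
  · simp only [h1, if_pos]
    exact ⟨hlr, hlf, hlc, hrows, hf01, hcnt, habs, by simp [hres, hsum], hsum, htot⟩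
  · simp only [if_neg h1]
    by_cases h2 : q.getD 0 0 = 2
    · simp only [if_pos h2]
      obtain ⟨hql, hb1, hb2, hb3, hb4⟩ := hq2 h2
      have ht1 : PySem.List.pyGetD q 1 0 = q.getD 1 0 := by
        rw [pyGetD_toNat q 1 0 (by omega)]; rfl
      have ht2 : PySem.List.pyGetD q 2 0 = q.getD 2 0 := by
        rw [pyGetD_toNat q 2 0 (by omega)]; rfl
      rw [ht1, ht2]
      have hr : PySem.Raise.InRange A.toNat (q.getD 1 0 - 1) := inRange_of_bounds _ _ hb1 hb2
      have hc : PySem.Raise.InRange A.toNat (q.getD 2 0 - 1) := inRange_of_bounds _ _ hb3 hb4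
      set k := nidx A.toNat (q.getD 1 0 - 1) with hk
      set l := nidx A.toNat (q.getD 2 0 - 1) with hl
      have hkn : k < A.toNat := nidx_lt _ _ hr
      have hln : l < A.toNat := nidx_lt _ _ hc
      set rk := raw.getD k [] with hrkdef
      obtain ⟨hrklen, hrk01⟩ := hrows rk (getD_mem _ _ _ (by rw [hlr]; exact hkn))
      set v := rk.getD l 0 with hvdef
      have hv01 : v = 0 ∨ v = 1 := hrk01 _ (getD_mem _ _ _ (by rw [hrklen]; exact hln))
      set fk := flip.getD k 0 with hfkdef
      have hfk01 : fk = 0 ∨ fk = 1 := hf01 _ (getD_mem _ _ _ (by rw [hlf]; exact hkn))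
      set arow := a.getD k [] with harowdef
      have harow : arow = flipRow fk rk := by
        rw [harowdef, habs, getD_absMat _ _ _ hflen (by rw [hlr]; exact hkn)]
      have harowlen : arow.length = A.toNat := by rw [harow, length_flipRow, hrklen]
      -- rewrite the python primitives
      have e1 : PySem.List.pyGetD raw (q.getD 1 0 - 1) [] = rk := by
        rw [pyGetD_nidx _ _ _ (hlr.symm ▸ hr), hlr]
      have e2 : PySem.List.pyGetD a (q.getD 1 0 - 1) [] = arow := by
        rw [pyGetD_nidx _ _ _ (hla.symm ▸ hr), hla]
      have e3 : PySem.List.pyGetD rk (q.getD 2 0 - 1) 0 = v := by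
        rw [pyGetD_nidx _ _ _ (hrklen.symm ▸ hc), hrklen]
      have e4 : PySem.List.pyGetD arow (q.getD 2 0 - 1) 0 = arow.getD l 0 := by
        rw [pyGetD_nidx _ _ _ (harowlen.symm ▸ hc), harowlen]
      have e5 : PySem.List.pyGetD flip (q.getD 1 0 - 1) 0 = fk := by
        rw [pyGetD_nidx _ _ _ (hlf.symm ▸ hr), hlf]
      have e6 : PySem.List.pyGetD cnt (q.getD 1 0 - 1) 0 = cnt.getD k 0 := by
        rw [pyGetD_nidx _ _ _ (hlc.symm ▸ hr), hlc]
      have e7 : ∀ x : Int, PySem.List.pySetD rk (q.getD 2 0 - 1) x = rk.set l x := by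
        intro x; rw [pySetD_nidx _ _ _ (hrklen.symm ▸ hc), hrklen]
      have e8 : ∀ x : Int, PySem.List.pySetD arow (q.getD 2 0 - 1) x = arow.set l x := by
        intro x; rw [pySetD_nidx _ _ _ (harowlen.symm ▸ hc), harowlen]
      have e9 : ∀ x, PySem.List.pySetD raw (q.getD 1 0 - 1) x = raw.set k x := by
        intro x; rw [pySetD_nidx _ _ _ (hlr.symm ▸ hr), hlr]
      have e10 : ∀ x, PySem.List.pySetD a (q.getD 1 0 - 1) x = a.set k x := by
        intro x; rw [pySetD_nidx _ _ _ (hla.symm ▸ hr), hla]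
      have e11 : ∀ x : Int, PySem.List.pySetD cnt (q.getD 1 0 - 1) x = cnt.set k x := by
        intro x; rw [pySetD_nidx _ _ _ (hlc.symm ▸ hr), hlc]
      rw [e1, e2, e3, e4, e5, e6, e7, e8, e9, e10, e11]
      have hvA : arow.getD l 0 = (if fk = 0 then v else 1 - v) := by
        rw [harow, getD_flipRow _ _ _ (by rw [hrklen]; exact hln)]
      rw [hvA]
      set old : Int := if fk = 0 then v else 1 - v with hold
      have hold01 : old = 0 ∨ old = 1 := by rw [hold]; split_ifs <;> omega
      have habs' : absMat flip (raw.set k (rk.set l (1 - v))) = a.set k (arow.set l (1 - old)) := by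
        rw [absMat_set_raw _ _ _ _ hflen (by rw [hlr]; exact hkn), ← habs,
          flipRow_set _ _ _ _ hfk01, harow]
        congr 2
        rw [hold]; split_ifs <;> ring
      have hentry : arow.getD l 0 = old := by rw [hvA, hold]
      have h01a : ∀ row ∈ a, ∀ x ∈ row, x = 0 ∨ x = 1 := by
        intro row hrow
        exact (rows01_absMat A.toNat flip raw hf01 hrows row (habs ▸ hrow)).2
      have htotset : tot (a.set k (arow.set l (1 - old))) = tot a + 1 - 2 * old := by
        rw [tot_set _ _ _ (by rw [hla]; exact hkn),
          sum_set_getD _ _ _ (by rw [harowlen]; exact hln), ← harowdef, hentry]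
        ring
      refine ⟨by simp [hlr], hlf, by simp [hlc], ?_, hf01, ?_, habs'.symm, hres, ?_, ?_⟩
      · exact rows01_set _ _ _ _ hrows (by simp [hrklen]) (by
          intro x hx
          rcases List.mem_or_eq_of_mem_set hx with hx' | rfl
          · exact hrk01 x hx'
          · omega)
      · rw [List.map_set, sum_set_getD _ _ _ (by rw [hrklen]; exact hln), hcnt]
        rw [getD_map' List.sum raw k 0 [] (by rw [hlr]; exact hkn), ← hrkdef, ← hvdef]
        ring
      · -- sum component
        dsimp only
        have hta : total = tot a := by rw [htot, habs]
        rcases hold01 with ho | ho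
        · rw [ho]; rw [if_neg (by norm_num)]
          omega
        · have h1le : 1 ≤ tot a := by
            refine tot_one_le a k l (by rw [hla]; exact hkn)
              (by rw [← harowdef, harowlen]; exact hln) h01a ?_
            rw [← harowdef, hentry, ho]
          rw [ho, if_pos ⟨by norm_num, by omega⟩]
          omega
      · dsimp only
        rw [habs', htotset]
        have hta : total = tot a := by rw [htot, habs]
        omega
    · simp only [if_neg h2]
      by_cases h3 : q.getD 0 0 = 3
      · simp only [if_pos h3]
        obtain ⟨hql, hb1, hb2⟩ := hq3 h3
        have ht1 : PySem.List.pyGetD q 1 0 = q.getD 1 0 := by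
          rw [pyGetD_toNat q 1 0 (by omega)]; rfl
        rw [ht1]
        have hA0 : 0 < A := pos_of_bounds _ _ hb1 hb2
        have hr : PySem.Raise.InRange A.toNat (q.getD 1 0 - 1) := inRange_of_bounds _ _ hb1 hb2
        set k := nidx A.toNat (q.getD 1 0 - 1) with hk
        have hkn : k < A.toNat := nidx_lt _ _ hr
        set rk := raw.getD k [] with hrkdef
        obtain ⟨hrklen, hrk01⟩ := hrows rk (getD_mem _ _ _ (by rw [hlr]; exact hkn))
        set fk := flip.getD k 0 with hfkdef
        have hfk01 : fk = 0 ∨ fk = 1 := hf01 _ (getD_mem _ _ _ (by rw [hlf]; exact hkn))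
        set arow := a.getD k [] with harowdef
        have harow : arow = flipRow fk rk := by
          rw [harowdef, habs, getD_absMat _ _ _ hflen (by rw [hlr]; exact hkn)]
        have harowlen : arow.length = A.toNat := by rw [harow, length_flipRow, hrklen]
        have e5 : PySem.List.pyGetD flip (q.getD 1 0 - 1) 0 = fk := by
          rw [pyGetD_nidx _ _ _ (hlf.symm ▸ hr), hlf]
        have e6 : PySem.List.pyGetD cnt (q.getD 1 0 - 1) 0 = cnt.getD k 0 := by
          rw [pyGetD_nidx _ _ _ (hlc.symm ▸ hr), hlc]
        have e12 : ∀ x : Int, PySem.List.pySetD flip (q.getD 1 0 - 1) x = flip.set k x := by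
          intro x; rw [pySetD_nidx _ _ _ (hlf.symm ▸ hr), hlf]
        rw [e5, e6, e12]
        have hloop := inner_loop A (q.getD 1 0 - 1) hr A.toNat 0 a sum (by omega) le_rfl hla
          (fun row hrow => rows01_absMat A.toNat flip raw hf01 hrows row (habs ▸ hrow))
          (by rw [hsum, htot, habs])
        simp only [Int.toNat_zero, List.take_zero, List.drop_zero, List.nil_append] at hloop
        rw [hloop]
        have hcntk : cnt.getD k 0 = rk.sum := by
          rw [hcnt, getD_map' List.sum raw k 0 [] (by rw [hlr]; exact hkn), ← hrkdef]
        have hAcast : (A.toNat : Int) = A := Int.toNat_of_nonneg (by omega)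
        have hones : (if fk = 0 then cnt.getD k 0 else A - cnt.getD k 0) = arow.sum := by
          rcases hfk01 with hf | hf
          · rw [hf, if_pos rfl, hcntk, harow, hf]; rfl
          · rw [hf, if_neg (by norm_num), hcntk, harow, hf]
            unfold flipRow
            rw [if_neg (by norm_num), sum_map_one_sub, hrklen, hAcast]
        have habs2 : a.set k (arow.map (fun x => 1 - x)) = absMat (flip.set k (1 - fk)) raw := by
          rw [absMat_set_flip _ _ _ _ hflen (by rw [hlr]; exact hkn), ← habs, ← hrkdef,
            flipRow_one_sub _ _ hfk01, ← harow]
        have htotX : tot (a.set k (arow.map (fun x => 1 - x))) = total + (A - 2 * arow.sum) := by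
          rw [tot_set _ _ _ (by rw [hla]; exact hkn), ← harowdef, sum_map_one_sub, harowlen, hAcast]
          have hta : total = tot a := by rw [htot, habs]
          omega
        refine ⟨hlr, by simp [hlf], hlc, hrows, ?_, hcnt, ?_, hres, ?_, ?_⟩
        · intro f hf'
          rcases List.mem_or_eq_of_mem_set hf' with hm | rfl
          · exact hf01 f hm
          · rcases hfk01 with hf | hf <;> simp [hf]
        · dsimp only
          rw [← hk, ← harowdef, habs2]
        · dsimp only
          rw [← hk, ← harowdef, hones, htotX]
        · dsimp only
          rw [hones, ← habs2, htotX]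
      · simp only [if_neg h3]
        exact ⟨hlr, hlf, hlc, hrows, hf01, hcnt, habs, hres, hsum, htot⟩

lemma fold_rel (A : Int) (L : List (List Int)) (sa : List (List Int) × List Int × Int)
    (sb : List (List Int) × List Int × List Int × Int × List Int)
    (hL : ∀ q ∈ L, Qok A q) (h : InvAB A sa sb) :
    InvAB A (L.foldl (stepA A) sa) (L.foldl (stepB A) sb) := by
  induction L generalizing sa sb with
  | nil => exact h
  | cons q t ih =>
    exact ih _ _ (fun x hx => hL x (List.mem_cons_of_mem _ hx))
      (step_rel A q sa sb (hL q (List.mem_cons_self)) h)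

lemma inv_init (A : Int) :
    InvAB A ((PySem.List.pyRange 0 A 1).map (fun _ => List.replicate A.toNat (0 : Int)), [], 0)
      ((PySem.List.pyRange 0 A 1).map (fun _ => List.replicate A.toNat (0 : Int)),
       List.replicate A.toNat (0 : Int), List.replicate A.toNat (0 : Int), 0, []) := by
  have hmap : (PySem.List.pyRange 0 A 1).map (fun _ => List.replicate A.toNat (0 : Int))
      = List.replicate A.toNat (List.replicate A.toNat (0 : Int)) := by
    rw [List.map_const']
    congr 1
    simp [PySem.List.length_pyRange_one]
  unfold InvAB rows01 absMat tot
  rw [hmap]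
  refine ⟨by simp, by simp, by simp, ?_, ?_, ?_, ?_, rfl, rfl, ?_⟩
  · intro row hrow
    rw [List.eq_of_mem_replicate hrow]
    simp [List.mem_replicate]
  · intro f hf
    exact Or.inl (List.eq_of_mem_replicate hf)
  · simp [List.map_replicate]
  · rw [List.zipWith_replicate']
    simp [flipRow]
  · rw [List.zipWith_replicate']
    simp [flipRow, List.map_replicate]

-- ===== VERDICT (by name: the statement is the Claim_ definition above) =====
theorem solve_spec : Claim_equal_solve := by
  intro A B _ hpre
  unfold Spec_solve solve solve_alt
  dsimp only
  rw [PySem.List.foldl_pyRange_zero_pyGetD B [] (stepA A)]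
  have h := fold_rel A B _ _ (fun q hq => hpre q hq) (inv_init A)
  exact h.2.2.2.2.2.2.2.1
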